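-- pv_equiv track=rewrite | github.com/agunbuhori/quran-flutter | assets/databases/quran-fetcher/surah.py | replace_substrings
-- ===== SOURCE A (Python) =====
-- def replace_substrings(input_string):
--     replacements = {
--         'aw': 'au',
--         'th': 'ts',
--         'sh': 'sy'
--     }
--     result = ""
--     i = 0
--     while i < len(input_string):
--         found = False
--         for substring, replacement in replacements.items():
--             if input_string[i:i+len(substring)].lower() == substring:
--                 if input_string[i:i+len(substring)].islower():
--                     result += replacement
--                 elif input_string[i:i+len(substring)].istitle():
--                     result += replacement.title()
--                 else:
--                     result += replacement.upper()
--                 i += len(substring)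
--                 found = True
--                 break
--         if not found:
--             result += input_string[i]
--             i += 1
--     return result
-- ===== SOURCE B (Python) =====
-- def replace_substrings(input_string):
--     # The patterns 'aw', 'th', 'sh' can never overlap (no pattern's second
--     # letter is any pattern's first letter), so A's greedy left-to-right scan
--     # replaces exactly every occurrence; case is handled by spelling out the
--     # four concrete case variants of each pattern.  The 'sh' passes must run
--     # before the 'th' passes because 'th'->'ts' can create a new 'sh' that the
--     # scan would not have replaced; no other pass can create or destroy a match.
--     s = input_string
--     for pattern, replacement in (('aw', 'au'), ('Aw', 'Au'), ('aW', 'AU'), ('AW', 'AU'),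
--                                  ('sh', 'sy'), ('Sh', 'Sy'), ('sH', 'SY'), ('SH', 'SY'),
--                                  ('th', 'ts'), ('Th', 'Ts'), ('tH', 'TS'), ('TH', 'TS')):
--         s = s.replace(pattern, replacement)
--     return s
-- ===== Notes on version B (the rewrite author's own statement) =====
-- stated objective: faster
-- what changed: Replaces A's single greedy character-by-character scan (slice, lowercase-compare and case-branch at every position) by twelve whole-string str.replace passes, one per concrete case variant of each pattern; correct because pattern occurrences can never overlap (no pattern's second letter is any pattern's first), and the 'sh' passes run before the 'th' passes because a 'th' replacement can create a new 'sh' that the scan would not have replaced.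
import Mathlib
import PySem

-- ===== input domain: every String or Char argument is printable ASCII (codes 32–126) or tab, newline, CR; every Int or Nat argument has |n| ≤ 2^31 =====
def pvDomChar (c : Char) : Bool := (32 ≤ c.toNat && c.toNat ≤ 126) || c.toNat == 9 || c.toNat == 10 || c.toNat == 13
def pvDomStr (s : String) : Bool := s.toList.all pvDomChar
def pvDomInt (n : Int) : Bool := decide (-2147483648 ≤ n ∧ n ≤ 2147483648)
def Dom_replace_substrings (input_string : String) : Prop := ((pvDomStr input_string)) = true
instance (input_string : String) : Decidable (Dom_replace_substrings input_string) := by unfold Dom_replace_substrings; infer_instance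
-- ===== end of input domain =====

-- B replaces A's character-by-character greedy scan by a chain of twelve plain str.replace
-- passes (one per concrete case variant; 'sh' passes before 'th' passes, which can create
-- a new 'sh'); correct because the three patterns can never overlap.

-- A-side hand ports of Python str.islower / str.istitle / str.title (exact on ASCII)
def pyCased (c : Char) : Bool := PySem.Str.islower c || PySem.Str.isupper c

def pyStrIslower (l : List Char) : Bool :=
  l.any pyCased && l.all (fun c => !(PySem.Str.isupper c))

def pyIstitleGo : List Char → Bool → Bool → Bool
  | [], _, found => found
  | c :: rest, prevCased, found =>
    if PySem.Str.isupper c then (if prevCased then false else pyIstitleGo rest true true)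
    else if PySem.Str.islower c then (if prevCased then pyIstitleGo rest true true else false)
    else pyIstitleGo rest false found

def pyStrIstitle (l : List Char) : Bool := pyIstitleGo l false false

def pyTitleGo : List Char → Bool → List Char
  | [], _ => []
  | c :: rest, prevCased =>
    if pyCased c then
      (if prevCased then PySem.Chars.lowerChar c else PySem.Chars.upperChar c) :: pyTitleGo rest true
    else c :: pyTitleGo rest false

def pyStrTitle (l : List Char) : List Char := pyTitleGo l false

def pvReplacements : List (List Char × List Char) :=
  [(['a','w'], ['a','u']), (['t','h'], ['t','s']), (['s','h'], ['s','y'])]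

-- ===== PORT A =====
-- the inner 'for substring, replacement in replacements.items(): … break'
def aTry : List (List Char × List Char) → List Char → Nat → Option (List Char × Nat)
  | [], _, _ => none
  | (sub, repl) :: rest, s, i =>
    let seg := PySem.List.slice s (some (i : Int)) (some ((i : Int) + (sub.length : Int)))
    if PySem.Chars.lower seg = sub then
      some ((if pyStrIslower seg then repl
             else if pyStrIstitle seg then pyStrTitle repl
             else PySem.Chars.upper repl), sub.length)
    else aTry rest s i

-- the 'while i < len(input_string)' loop; fuel = length bounds the iteration count
def aLoop : Nat → List Char → Nat → List Char → List Char
  | 0, _, _, result => result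
  | fuel + 1, s, i, result =>
    if i < s.length then
      match aTry pvReplacements s i with
      | some (r, k) => aLoop fuel s (i + k) (result ++ r)
      | none =>
        match PySem.List.pyGet? s (i : Int) with
        | some c => aLoop fuel s (i + 1) (result ++ [c])
        | none => result
    else result

def replace_substrings (input_string : String) : String :=
  String.ofList (aLoop input_string.toList.length input_string.toList 0 [])

-- ===== PORT B =====
-- the literal tuple of (pattern, replacement) passes of Source B, in Source B's order
def pvPasses : List (String × String) :=
  [("aw", "au"), ("Aw", "Au"), ("aW", "AU"), ("AW", "AU"),
   ("sh", "sy"), ("Sh", "Sy"), ("sH", "SY"), ("SH", "SY"),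
   ("th", "ts"), ("Th", "Ts"), ("tH", "TS"), ("TH", "TS")]

-- 'for pattern, replacement in …: s = s.replace(pattern, replacement)'
def replace_substrings_alt (input_string : String) : String :=
  pvPasses.foldl (fun s pr => PySem.Str.replace s pr.1 pr.2) input_string

-- ===== PRECONDITION & SPEC =====
def Spec_replace_substrings (input_string : String) (out : String) : Prop := out = replace_substrings_alt input_string
instance (input_string : String) (out : String) : Decidable (Spec_replace_substrings input_string out) := by unfold Spec_replace_substrings; infer_instance

-- ===== CLAIM (what is proved, stated in full; the proofs are below) =====
def Claim_equal_replace_substrings : Prop := ∀ (input_string : String), Dom_replace_substrings input_string → Spec_replace_substrings input_string (replace_substrings input_string)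

-- ===== LEMMAS AND PROOFS =====

-- Char facts ------------------------------------------------------------

theorem pvCharEq (c u : Char) (h : c.toNat = u.toNat) : c = u := by
  apply Char.ext; apply UInt32.toNat_inj.mp; exact h

theorem pvUpperIff (c : Char) : PySem.Chars.isupper c = true ↔ 65 ≤ c.toNat ∧ c.toNat ≤ 90 := by
  simp only [PySem.Chars.isupper, Bool.and_eq_true, decide_eq_true_eq, Char.le_def,
    UInt32.le_iff_toNat_le, Char.toNat_val]
  have h1 : 'A'.toNat = 65 := rfl
  have h2 : 'Z'.toNat = 90 := rfl
  omega

-- lowerChar sends exactly l and its upper-case partner u to the lower-case letter l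
theorem pvLowerEq (c l u : Char) (hul : u.toNat + 32 = l.toNat)
    (hu : PySem.Chars.isupper u = true) (hl : PySem.Chars.isupper l = false) :
    (PySem.Chars.lowerChar c = l) ↔ (c = l ∨ c = u) := by
  rw [pvUpperIff] at hu
  have hl' : ¬ (65 ≤ l.toNat ∧ l.toNat ≤ 90) := by
    rw [← pvUpperIff]; simp [hl]
  unfold PySem.Chars.lowerChar
  split_ifs with h
  · rw [pvUpperIff] at h
    have e1 : (Char.ofNat (c.toNat + 32)).toNat = c.toNat + 32 := by
      rw [Char.toNat_ofNat, if_pos (Or.inl (by omega))]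
    constructor
    · intro he
      right
      apply pvCharEq
      have h2 := congrArg Char.toNat he
      rw [e1] at h2
      omega
    · rintro (rfl | rfl)
      · exact absurd h hl'
      · apply pvCharEq; rw [e1]; omega
  · rw [pvUpperIff] at h
    constructor
    · rintro rfl; left; rfl
    · rintro (rfl | rfl)
      · rfl
      · exact absurd hu h

-- str.replace with a fixed two-character pattern, as a clean recursion ----

def rep2 (p0 p1 r0 r1 : Char) : List Char → List Char
  | c0 :: c1 :: t =>
    if c0 = p0 ∧ c1 = p1 then r0 :: r1 :: rep2 p0 p1 r0 r1 t
    else c0 :: rep2 p0 p1 r0 r1 (c1 :: t)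
  | l => l

theorem pvGo_nil (old new : List Char) (fuel : Nat) (acc : List Char) :
    PySem.Chars.replace.go old new fuel [] acc = acc.reverse := by
  cases fuel <;> simp [PySem.Chars.replace.go]

theorem pvGo_eq_rep2 (p0 p1 r0 r1 : Char) :
    ∀ (fuel : Nat) (l acc : List Char), l.length ≤ fuel →
      PySem.Chars.replace.go [p0, p1] [r0, r1] fuel l acc = acc.reverse ++ rep2 p0 p1 r0 r1 l := by
  intro fuel
  induction fuel with
  | zero =>
    intro l acc h
    have : l = [] := List.eq_nil_of_length_eq_zero (by omega)
    subst this
    simp [PySem.Chars.replace.go, rep2]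
  | succ fuel ih =>
    intro l acc h
    match l with
    | [] => simp [pvGo_nil, rep2]
    | [c] =>
      have hpre : List.isPrefixOf [p0, p1] [c] = false := by
        simp [List.isPrefixOf]
      show PySem.Chars.replace.go [p0, p1] [r0, r1] (fuel + 1) [c] acc = _
      have : PySem.Chars.replace.go [p0, p1] [r0, r1] (fuel + 1) [c] acc =
          PySem.Chars.replace.go [p0, p1] [r0, r1] fuel [] (c :: acc) := by
        simp [PySem.Chars.replace.go, hpre]
      rw [this, pvGo_nil]
      simp [rep2]
    | c0 :: c1 :: t =>
      have hstep : PySem.Chars.replace.go [p0, p1] [r0, r1] (fuel + 1) (c0 :: c1 :: t) acc =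
          if List.isPrefixOf [p0, p1] (c0 :: c1 :: t) then
            PySem.Chars.replace.go [p0, p1] [r0, r1] fuel t ([r0, r1].reverse ++ acc)
          else PySem.Chars.replace.go [p0, p1] [r0, r1] fuel (c1 :: t) (c0 :: acc) := rfl
      rw [hstep]
      have hif : List.isPrefixOf [p0, p1] (c0 :: c1 :: t) = true ↔ (c0 = p0 ∧ c1 = p1) := by
        simp [List.isPrefixOf]
        tauto
      by_cases hm : c0 = p0 ∧ c1 = p1
      · rw [if_pos (hif.mpr hm)]
        rw [ih t _ (by simp at h ⊢; omega)]
        simp [rep2, hm]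
      · rw [if_neg (by rw [hif]; exact hm)]
        rw [ih (c1 :: t) _ (by simp at h ⊢; omega)]
        simp [rep2, hm]

theorem pvReplace_eq_rep2 (p0 p1 r0 r1 : Char) (l : List Char) :
    PySem.Chars.replace l [p0, p1] [r0, r1] = rep2 p0 p1 r0 r1 l := by
  have h : ([p0, p1] : List Char).isEmpty = false := rfl
  simp only [PySem.Chars.replace, h, Bool.false_eq_true, if_false]
  rw [pvGo_eq_rep2 p0 p1 r0 r1 l.length l [] le_rfl]
  rfl

-- the pass chain on char lists; a pass is ((p0, p1), (r0, r1)) -----------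

def chainP (ps : List ((Char × Char) × (Char × Char))) (x : List Char) : List Char :=
  ps.foldl (fun l q => rep2 q.1.1 q.1.2 q.2.1 q.2.2 l) x

def pvPassesP : List ((Char × Char) × (Char × Char)) :=
  [(('a','w'), ('a','u')), (('A','w'), ('A','u')), (('a','W'), ('A','U')), (('A','W'), ('A','U')),
   (('s','h'), ('s','y')), (('S','h'), ('S','y')), (('s','H'), ('S','Y')), (('S','H'), ('S','Y')),
   (('t','h'), ('t','s')), (('T','h'), ('T','s')), (('t','H'), ('T','S')), (('T','H'), ('T','S'))]

-- every pass keeps the lower-case letter of the head: lowerChar r0 = lowerChar p0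
def pvGood (q : (Char × Char) × (Char × Char)) : Prop :=
  PySem.Chars.lowerChar q.2.1 = PySem.Chars.lowerChar q.1.1

theorem pvChain_cons_pass (ps : List ((Char × Char) × (Char × Char))) (q) (x) :
    chainP (q :: ps) x = chainP ps (rep2 q.1.1 q.1.2 q.2.1 q.2.2 x) := rfl

theorem pvChain_append (ps qs : List ((Char × Char) × (Char × Char))) (x) :
    chainP (ps ++ qs) x = chainP qs (chainP ps x) := by
  simp [chainP, List.foldl_append]

theorem pvRep2_nil (p0 p1 r0 r1 : Char) : rep2 p0 p1 r0 r1 [] = [] := rfl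

theorem pvRep2_single (p0 p1 r0 r1 c : Char) : rep2 p0 p1 r0 r1 [c] = [c] := rfl

-- head's lower-case letter is preserved by a good pass
theorem pvRep2_hl (p0 p1 r0 r1 : Char) (hg : PySem.Chars.lowerChar r0 = PySem.Chars.lowerChar p0)
    (x : List Char) :
    (rep2 p0 p1 r0 r1 x).head?.map PySem.Chars.lowerChar = x.head?.map PySem.Chars.lowerChar := by
  match x with
  | [] => rfl
  | [c] => rfl
  | c0 :: c1 :: t =>
    show (rep2 p0 p1 r0 r1 (c0 :: c1 :: t)).head?.map _ = _
    by_cases hm : c0 = p0 ∧ c1 = p1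
    · simp [rep2, hm, hg]
    · simp [rep2, hm]

-- a pass slides over a char whose pair with the following head cannot match
theorem pvRep2_cons (p0 p1 r0 r1 c : Char) (x : List Char)
    (h : c ≠ p0 ∨ x.head?.map PySem.Chars.lowerChar ≠ some (PySem.Chars.lowerChar p1)) :
    rep2 p0 p1 r0 r1 (c :: x) = c :: rep2 p0 p1 r0 r1 x := by
  match x with
  | [] => rfl
  | d :: t =>
    have hm : ¬ (c = p0 ∧ d = p1) := by
      rintro ⟨rfl, rfl⟩
      rcases h with h | h
      · exact h rfl
      · exact h rfl
    simp [rep2, hm]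

theorem pvChain_cons (ps : List ((Char × Char) × (Char × Char))) (hg : ∀ q ∈ ps, pvGood q)
    (c : Char) :
    ∀ x, (∀ q ∈ ps, c ≠ q.1.1 ∨ x.head?.map PySem.Chars.lowerChar ≠ some (PySem.Chars.lowerChar q.1.2)) →
      chainP ps (c :: x) = c :: chainP ps x := by
  induction ps with
  | nil => intro x _; rfl
  | cons q ps ih =>
    intro x hc
    rw [pvChain_cons_pass, pvRep2_cons _ _ _ _ _ _ (hc q (List.mem_cons_self)), pvChain_cons_pass]
    apply ih (fun p hp => hg p (List.mem_cons_of_mem q hp))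
    intro p hp
    rw [pvRep2_hl _ _ _ _ (hg q (List.mem_cons_self)) x]
    exact hc p (List.mem_cons_of_mem q hp)

-- a pass slides over a pair that is not its exact pattern, where the second
-- char's letter can start no pattern
theorem pvRep2_cons2 (p0 p1 r0 r1 c0 c1 : Char) (x : List Char)
    (hm : ¬ (c0 = p0 ∧ c1 = p1))
    (h1 : PySem.Chars.lowerChar c1 ≠ PySem.Chars.lowerChar p0) :
    rep2 p0 p1 r0 r1 (c0 :: c1 :: x) = c0 :: c1 :: rep2 p0 p1 r0 r1 x := by
  have h2 : c1 ≠ p0 := fun he => h1 (by rw [he])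
  rw [show rep2 p0 p1 r0 r1 (c0 :: c1 :: x) = c0 :: rep2 p0 p1 r0 r1 (c1 :: x) by simp [rep2, hm]]
  rw [pvRep2_cons _ _ _ _ _ _ (Or.inl h2)]

theorem pvChain_cons2 (ps : List ((Char × Char) × (Char × Char))) (c0 c1 : Char)
    (hm : ∀ q ∈ ps, ¬ (c0 = q.1.1 ∧ c1 = q.1.2))
    (h1 : ∀ q ∈ ps, PySem.Chars.lowerChar c1 ≠ PySem.Chars.lowerChar q.1.1) :
    ∀ x, chainP ps (c0 :: c1 :: x) = c0 :: c1 :: chainP ps x := by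
  induction ps with
  | nil => intro x; rfl
  | cons q ps ih =>
    intro x
    rw [pvChain_cons_pass,
      pvRep2_cons2 _ _ _ _ _ _ _ (hm q (List.mem_cons_self)) (h1 q (List.mem_cons_self)),
      pvChain_cons_pass]
    exact ih (fun p hp => hm p (List.mem_cons_of_mem q hp))
      (fun p hp => h1 p (List.mem_cons_of_mem q hp)) (rep2 q.1.1 q.1.2 q.2.1 q.2.2 x)

theorem pvChain_nil (ps : List ((Char × Char) × (Char × Char))) : chainP ps [] = [] := by
  induction ps with
  | nil => rfl
  | cons q ps ih => rw [pvChain_cons_pass, pvRep2_nil]; exact ih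

theorem pvChain_single (ps : List ((Char × Char) × (Char × Char))) (c : Char) :
    chainP ps [c] = [c] := by
  induction ps with
  | nil => rfl
  | cons q ps ih => rw [pvChain_cons_pass, pvRep2_single]; exact ih

-- scanA: A's greedy scan as a clean structural recursion -----------------

def scanA : List Char → List Char
  | c0 :: c1 :: rest =>
    let t : List Char := [c0, c1]
    match List.lookup (PySem.Chars.lower t) pvReplacements with
    | some r =>
        (if pyStrIslower t then r
         else if pyStrIstitle t then pyStrTitle r
         else PySem.Chars.upper r) ++ scanA rest
    | none => c0 :: scanA (c1 :: rest)
  | l => l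

-- (A side, from the previous machinery) aLoop = scanA --------------------

theorem pv_slice2 (s : List Char) (i : Nat) (c0 c1 : Char) (rest : List Char)
    (hd : s.drop i = c0 :: c1 :: rest) :
    PySem.List.slice s (some (i:Int)) (some ((i:Int) + 2)) = [c0, c1] := by
  have h := PySem.List.slice_natCast_add (xs := s) (j := i) (n := 2)
  push_cast at h
  rw [h, hd]
  rfl

theorem pv_slice1 (s : List Char) (i : Nat) (c0 : Char)
    (hd : s.drop i = [c0]) :
    PySem.List.slice s (some (i:Int)) (some ((i:Int) + 2)) = [c0] := by
  have h := PySem.List.slice_natCast_add (xs := s) (j := i) (n := 2)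
  push_cast at h
  rw [h, hd]
  rfl

theorem pv_get (s : List Char) (i : Nat) (c0 : Char) (t : List Char)
    (hd : s.drop i = c0 :: t) :
    PySem.List.pyGet? s (i : Int) = some c0 := by
  rw [PySem.List.pyGet?_natCast]
  have h0 : (s.drop i)[0]? = some c0 := by rw [hd]; rfl
  rw [List.getElem?_drop] at h0
  simpa using h0

theorem pv_lookup3 (x y : Char) :
    List.lookup [x, y] pvReplacements =
    (if ([x,y] : List Char) = ['a','w'] then some ['a','u']
     else if ([x,y] : List Char) = ['t','h'] then some ['t','s']
     else if ([x,y] : List Char) = ['s','h'] then some ['s','y'] else none) := by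
  cases hxa : x == 'a' <;> cases hxt : x == 't' <;> cases hxs : x == 's' <;>
    cases hyw : y == 'w' <;> cases hyh : y == 'h' <;>
    simp [List.lookup, pvReplacements, hxa, hxt, hxs, hyw, hyh] <;>
    simp_all

theorem pv_aTry2 (s : List Char) (i : Nat) (c0 c1 : Char) (rest : List Char)
    (hd : s.drop i = c0 :: c1 :: rest) :
    aTry pvReplacements s i =
      (List.lookup (PySem.Chars.lower [c0, c1]) pvReplacements).map
        (fun r => ((if pyStrIslower [c0, c1] then r
                    else if pyStrIstitle [c0, c1] then pyStrTitle r
                    else PySem.Chars.upper r), 2)) := by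
  have hs := pv_slice2 s i c0 c1 rest hd
  have hL : PySem.Chars.lower [c0, c1] = [PySem.Chars.lowerChar c0, PySem.Chars.lowerChar c1] := by
    simp [PySem.Chars.lower]
  rw [hL, pv_lookup3]
  simp only [aTry, pvReplacements]
  norm_num [hs, hL]
  split_ifs <;> simp_all

theorem pv_aTry1 (s : List Char) (i : Nat) (c0 : Char)
    (hd : s.drop i = [c0]) :
    aTry pvReplacements s i = none := by
  have hs := pv_slice1 s i c0 hd
  simp only [aTry, pvReplacements]
  norm_num [hs]
  simp [PySem.Chars.lower]

theorem pv_main (fuel : Nat) : ∀ (s : List Char) (i : Nat) (result : List Char),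
    s.length ≤ i + fuel → aLoop fuel s i result = result ++ scanA (s.drop i) := by
  induction fuel with
  | zero =>
    intro s i result h
    have hnil : s.drop i = [] := List.drop_eq_nil_of_le (by omega)
    simp [aLoop, hnil, scanA]
  | succ fuel ih =>
    intro s i result h
    by_cases hi : i < s.length
    · have hlen : (s.drop i).length = s.length - i := List.length_drop ..
      match hd : s.drop i with
      | [] => rw [hd] at hlen; simp at hlen; omega
      | [c0] =>
        have htry := pv_aTry1 s i c0 hd
        have hget := pv_get s i c0 [] hd
        have hdrop1 : s.drop (i+1) = [] := by
          have h1 := List.drop_drop (l := s) (i := 1) (j := i)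
          rw [hd] at h1
          rw [← h1]
          rfl
        simp only [aLoop, if_pos hi, htry]
        rw [hget]
        show aLoop fuel s (i + 1) (result ++ [c0]) = result ++ scanA [c0]
        rw [ih s (i+1) (result ++ [c0]) (by omega), hdrop1]
        simp [scanA]
      | c0 :: c1 :: rest =>
        have htry := pv_aTry2 s i c0 c1 rest hd
        have hdrop2 : s.drop (i+2) = rest := by
          have h2 := List.drop_drop (l := s) (i := 2) (j := i)
          rw [hd] at h2
          rw [← h2]
          rfl
        have hdrop1 : s.drop (i+1) = c1 :: rest := by
          have h1 := List.drop_drop (l := s) (i := 1) (j := i)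
          rw [hd] at h1
          rw [← h1]
          rfl
        have hget := pv_get s i c0 (c1 :: rest) hd
        simp only [aLoop, if_pos hi, htry]
        cases hlk : List.lookup (PySem.Chars.lower [c0, c1]) pvReplacements with
        | some r =>
          simp only [Option.map_some]
          show aLoop fuel s (i + 2)
              (result ++ (if pyStrIslower [c0, c1] then r
                          else if pyStrIstitle [c0, c1] then pyStrTitle r
                          else PySem.Chars.upper r)) = result ++ scanA (c0 :: c1 :: rest)
          rw [ih s (i+2) _ (by omega), hdrop2]
          simp [scanA, hlk]
        | none =>
          simp only [Option.map_none]
          rw [hget]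
          show aLoop fuel s (i + 1) (result ++ [c0]) = result ++ scanA (c0 :: c1 :: rest)
          rw [ih s (i+1) _ (by omega), hdrop1]
          simp [scanA, hlk]
    · have hnil : s.drop i = [] := List.drop_eq_nil_of_le (by omega)
      simp [aLoop, hi, hnil, scanA]

-- (B side) the twelve-pass chain equals scanA ----------------------------

-- a matched case variant is consumed by its own pass while every other pass
-- slides over the two characters involved
theorem pvStepLemma (pre post : List ((Char × Char) × (Char × Char))) (c0 c1 r0 r1 : Char)
    (hsplit : pvPassesP = pre ++ ((c0, c1), (r0, r1)) :: post)
    (hmpre : ∀ p ∈ pre, ¬ (c0 = p.1.1 ∧ c1 = p.1.2))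
    (h1pre : ∀ p ∈ pre, PySem.Chars.lowerChar c1 ≠ PySem.Chars.lowerChar p.1.1)
    (hmpost : ∀ p ∈ post, ¬ (r0 = p.1.1 ∧ r1 = p.1.2))
    (h1post : ∀ p ∈ post, PySem.Chars.lowerChar r1 ≠ PySem.Chars.lowerChar p.1.1)
    (x : List Char) :
    chainP pvPassesP (c0 :: c1 :: x) = r0 :: r1 :: chainP pvPassesP x := by
  rw [hsplit, pvChain_append, pvChain_append]
  rw [pvChain_cons2 pre c0 c1 hmpre h1pre x]
  rw [pvChain_cons_pass, pvChain_cons_pass]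
  rw [show rep2 c0 c1 r0 r1 (c0 :: c1 :: chainP pre x) =
        r0 :: r1 :: rep2 c0 c1 r0 r1 (chainP pre x) by simp [rep2]]
  rw [pvChain_cons2 post r0 r1 hmpost h1post]

-- a pass cannot start at a char whose lower-case pair is no pattern
theorem pvCond (c0 c1 p0 p1 a b : Char) (hp0 : PySem.Chars.lowerChar p0 = a)
    (hp1 : PySem.Chars.lowerChar p1 = b)
    (hnp : ¬ (PySem.Chars.lowerChar c0 = a ∧ PySem.Chars.lowerChar c1 = b)) :
    ¬ c0 = p0 ∨ ¬ PySem.Chars.lowerChar c1 = PySem.Chars.lowerChar p1 := by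
  by_cases hc : PySem.Chars.lowerChar c0 = a
  · right; intro he; exact hnp ⟨hc, by rw [he, hp1]⟩
  · left; rintro rfl; exact hc hp0

-- the styled replacement of A evaluates to the variant's literal replacement
theorem pvStyled (c0 c1 r0 r1 : Char) (r : List Char) (X : List Char)
    (h : (if pyStrIslower [c0, c1] then r
          else if pyStrIstitle [c0, c1] then pyStrTitle r
          else PySem.Chars.upper r) = [r0, r1]) :
    (if pyStrIslower [c0, c1] then r
     else if pyStrIstitle [c0, c1] then pyStrTitle r
     else PySem.Chars.upper r) ++ X = r0 :: r1 :: X := by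
  rw [h]; rfl

theorem pvGoodAll : ∀ q ∈ pvPassesP, pvGood q := by
  intro q hq
  fin_cases hq <;> (unfold pvGood; decide)

theorem pvChain_eq_scanA : ∀ (n : Nat) (s : List Char), s.length ≤ n →
    chainP pvPassesP s = scanA s := by
  intro n
  induction n with
  | zero =>
    intro s h
    have : s = [] := List.eq_nil_of_length_eq_zero (by omega)
    subst this
    simp [pvChain_nil, scanA]
  | succ n ih =>
    intro s h
    match s with
    | [] => simp [pvChain_nil, scanA]
    | [c] => simp [pvChain_single, scanA]
    | c0 :: c1 :: t =>
      have hlt : t.length ≤ n := by simp at h; omega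
      have hlt1 : (c1 :: t).length ≤ n := by simp at h ⊢; omega
      have hL : PySem.Chars.lower [c0, c1] = [PySem.Chars.lowerChar c0, PySem.Chars.lowerChar c1] := by
        simp [PySem.Chars.lower]
      cases hlk : List.lookup (PySem.Chars.lower [c0, c1]) pvReplacements with
      | none =>
        -- no candidate here: every pass slides over c0
        have hlk' := hlk
        rw [hL, pv_lookup3] at hlk'
        have hnp : ¬ (PySem.Chars.lowerChar c0 = 'a' ∧ PySem.Chars.lowerChar c1 = 'w') ∧
            ¬ (PySem.Chars.lowerChar c0 = 't' ∧ PySem.Chars.lowerChar c1 = 'h') ∧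
            ¬ (PySem.Chars.lowerChar c0 = 's' ∧ PySem.Chars.lowerChar c1 = 'h') := by
          refine ⟨?_, ?_, ?_⟩
          · rintro ⟨h1, h2⟩; rw [h1, h2] at hlk'; simp at hlk'
          · rintro ⟨h1, h2⟩
            rw [h1, h2] at hlk'
            have e : (['t', 'h'] : List Char) ≠ ['a', 'w'] := by decide
            simp [e] at hlk'
          · rintro ⟨h1, h2⟩
            rw [h1, h2] at hlk'
            have e1 : (['s', 'h'] : List Char) ≠ ['a', 'w'] := by decide
            have e2 : (['s', 'h'] : List Char) ≠ ['t', 'h'] := by decide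
            simp [e1, e2] at hlk'
        have hcond : ∀ q ∈ pvPassesP,
            c0 ≠ q.1.1 ∨ (c1 :: t).head?.map PySem.Chars.lowerChar ≠ some (PySem.Chars.lowerChar q.1.2) := by
          intro q hq
          simp only [List.head?_cons, Option.map_some, ne_eq, Option.some.injEq]
          fin_cases hq <;>
            first
            | exact pvCond _ _ _ _ 'a' 'w' (by decide) (by decide) hnp.1
            | exact pvCond _ _ _ _ 't' 'h' (by decide) (by decide) hnp.2.1
            | exact pvCond _ _ _ _ 's' 'h' (by decide) (by decide) hnp.2.2
        rw [pvChain_cons pvPassesP pvGoodAll c0 (c1 :: t) hcond, ih (c1 :: t) hlt1]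
        rw [show scanA (c0 :: c1 :: t) = c0 :: scanA (c1 :: t) by
          simp only [scanA]; rw [hlk]]
      | some r =>
        -- candidate pair; A consumes it with the styled replacement
        have hscan : scanA (c0 :: c1 :: t) =
            (if pyStrIslower [c0, c1] then r
             else if pyStrIstitle [c0, c1] then pyStrTitle r
             else PySem.Chars.upper r) ++ scanA t := by
          simp only [scanA]; rw [hlk]
        have hlk' := hlk
        rw [hL, pv_lookup3] at hlk'
        rw [hscan]
        split_ifs at hlk' with e1 e2 e3
        · -- lowered pair is 'aw'
          have e1' : PySem.Chars.lowerChar c0 = 'a' ∧ PySem.Chars.lowerChar c1 = 'w' := by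
            simpa using e1
          have hc0 := (pvLowerEq c0 'a' 'A' (by decide) (by decide) (by decide)).mp e1'.1
          have hc1 := (pvLowerEq c1 'w' 'W' (by decide) (by decide) (by decide)).mp e1'.2
          have hr : r = ['a', 'u'] := by injection hlk' with h'; rw [← h']
          subst hr
          rcases hc0 with rfl | rfl <;> rcases hc1 with rfl | rfl
          · rw [pvStyled _ _ 'a' 'u' _ _ (by decide),
              pvStepLemma [] _ 'a' 'w' 'a' 'u' rfl (by decide) (by decide) (by decide) (by decide) t,
              ih t hlt]
          · rw [pvStyled _ _ 'A' 'U' _ _ (by decide),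
              pvStepLemma [(('a','w'), ('a','u')), (('A','w'), ('A','u'))] _ 'a' 'W' 'A' 'U' rfl
                (by decide) (by decide) (by decide) (by decide) t,
              ih t hlt]
          · rw [pvStyled _ _ 'A' 'u' _ _ (by decide),
              pvStepLemma [(('a','w'), ('a','u'))] _ 'A' 'w' 'A' 'u' rfl
                (by decide) (by decide) (by decide) (by decide) t,
              ih t hlt]
          · rw [pvStyled _ _ 'A' 'U' _ _ (by decide),
              pvStepLemma [(('a','w'), ('a','u')), (('A','w'), ('A','u')), (('a','W'), ('A','U'))] _
                'A' 'W' 'A' 'U' rfl (by decide) (by decide) (by decide) (by decide) t,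
              ih t hlt]
        · -- lowered pair is 'th'
          have e2' : PySem.Chars.lowerChar c0 = 't' ∧ PySem.Chars.lowerChar c1 = 'h' := by
            simpa using e2
          have hc0 := (pvLowerEq c0 't' 'T' (by decide) (by decide) (by decide)).mp e2'.1
          have hc1 := (pvLowerEq c1 'h' 'H' (by decide) (by decide) (by decide)).mp e2'.2
          have hr : r = ['t', 's'] := by injection hlk' with h'; rw [← h']
          subst hr
          rcases hc0 with rfl | rfl <;> rcases hc1 with rfl | rfl
          · rw [pvStyled _ _ 't' 's' _ _ (by decide),
              pvStepLemma [(('a','w'), ('a','u')), (('A','w'), ('A','u')), (('a','W'), ('A','U')),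
                (('A','W'), ('A','U')), (('s','h'), ('s','y')), (('S','h'), ('S','y')),
                (('s','H'), ('S','Y')), (('S','H'), ('S','Y'))] _ 't' 'h' 't' 's' rfl
                (by decide) (by decide) (by decide) (by decide) t,
              ih t hlt]
          · rw [pvStyled _ _ 'T' 'S' _ _ (by decide),
              pvStepLemma [(('a','w'), ('a','u')), (('A','w'), ('A','u')), (('a','W'), ('A','U')),
                (('A','W'), ('A','U')), (('s','h'), ('s','y')), (('S','h'), ('S','y')),
                (('s','H'), ('S','Y')), (('S','H'), ('S','Y')), (('t','h'), ('t','s')),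
                (('T','h'), ('T','s'))] _ 't' 'H' 'T' 'S' rfl
                (by decide) (by decide) (by decide) (by decide) t,
              ih t hlt]
          · rw [pvStyled _ _ 'T' 's' _ _ (by decide),
              pvStepLemma [(('a','w'), ('a','u')), (('A','w'), ('A','u')), (('a','W'), ('A','U')),
                (('A','W'), ('A','U')), (('s','h'), ('s','y')), (('S','h'), ('S','y')),
                (('s','H'), ('S','Y')), (('S','H'), ('S','Y')), (('t','h'), ('t','s'))] _
                'T' 'h' 'T' 's' rfl (by decide) (by decide) (by decide) (by decide) t,
              ih t hlt]
          · rw [pvStyled _ _ 'T' 'S' _ _ (by decide),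
              pvStepLemma [(('a','w'), ('a','u')), (('A','w'), ('A','u')), (('a','W'), ('A','U')),
                (('A','W'), ('A','U')), (('s','h'), ('s','y')), (('S','h'), ('S','y')),
                (('s','H'), ('S','Y')), (('S','H'), ('S','Y')), (('t','h'), ('t','s')),
                (('T','h'), ('T','s')), (('t','H'), ('T','S'))] _ 'T' 'H' 'T' 'S' rfl
                (by decide) (by decide) (by decide) (by decide) t,
              ih t hlt]
        · -- lowered pair is 'sh'
          have e3' : PySem.Chars.lowerChar c0 = 's' ∧ PySem.Chars.lowerChar c1 = 'h' := by
            simpa using e3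
          have hc0 := (pvLowerEq c0 's' 'S' (by decide) (by decide) (by decide)).mp e3'.1
          have hc1 := (pvLowerEq c1 'h' 'H' (by decide) (by decide) (by decide)).mp e3'.2
          have hr : r = ['s', 'y'] := by injection hlk' with h'; rw [← h']
          subst hr
          rcases hc0 with rfl | rfl <;> rcases hc1 with rfl | rfl
          · rw [pvStyled _ _ 's' 'y' _ _ (by decide),
              pvStepLemma [(('a','w'), ('a','u')), (('A','w'), ('A','u')), (('a','W'), ('A','U')),
                (('A','W'), ('A','U'))] _ 's' 'h' 's' 'y' rfl
                (by decide) (by decide) (by decide) (by decide) t,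
              ih t hlt]
          · rw [pvStyled _ _ 'S' 'Y' _ _ (by decide),
              pvStepLemma [(('a','w'), ('a','u')), (('A','w'), ('A','u')), (('a','W'), ('A','U')),
                (('A','W'), ('A','U')), (('s','h'), ('s','y')), (('S','h'), ('S','y'))] _
                's' 'H' 'S' 'Y' rfl (by decide) (by decide) (by decide) (by decide) t,
              ih t hlt]
          · rw [pvStyled _ _ 'S' 'y' _ _ (by decide),
              pvStepLemma [(('a','w'), ('a','u')), (('A','w'), ('A','u')), (('a','W'), ('A','U')),
                (('A','W'), ('A','U')), (('s','h'), ('s','y'))] _ 'S' 'h' 'S' 'y' rfl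
                (by decide) (by decide) (by decide) (by decide) t,
              ih t hlt]
          · rw [pvStyled _ _ 'S' 'Y' _ _ (by decide),
              pvStepLemma [(('a','w'), ('a','u')), (('A','w'), ('A','u')), (('a','W'), ('A','U')),
                (('A','W'), ('A','U')), (('s','h'), ('s','y')), (('S','h'), ('S','y')),
                (('s','H'), ('S','Y'))] _ 'S' 'H' 'S' 'Y' rfl
                (by decide) (by decide) (by decide) (by decide) t,
              ih t hlt]

-- B's fold of Str.replace, moved to char lists, is the pass chain
theorem pvFold_toList : ∀ (ps : List (String × String)) (s : String),
    (ps.foldl (fun s pr => PySem.Str.replace s pr.1 pr.2) s).toList =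
      ps.foldl (fun l pr => PySem.Chars.replace l pr.1.toList pr.2.toList) s.toList := by
  intro ps
  induction ps with
  | nil => intro s; rfl
  | cons pr ps ih =>
    intro s
    simp only [List.foldl_cons, ih, PySem.Str.toList_replace]

theorem pvAlt_toList (s : String) :
    (replace_substrings_alt s).toList = chainP pvPassesP s.toList := by
  unfold replace_substrings_alt
  rw [pvFold_toList]
  simp only [pvPasses, List.foldl_cons, List.foldl_nil]
  simp only [show "aw".toList = ['a','w'] from rfl, show "au".toList = ['a','u'] from rfl,
    show "Aw".toList = ['A','w'] from rfl, show "Au".toList = ['A','u'] from rfl,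
    show "aW".toList = ['a','W'] from rfl, show "AU".toList = ['A','U'] from rfl,
    show "AW".toList = ['A','W'] from rfl,
    show "sh".toList = ['s','h'] from rfl, show "sy".toList = ['s','y'] from rfl,
    show "Sh".toList = ['S','h'] from rfl, show "Sy".toList = ['S','y'] from rfl,
    show "sH".toList = ['s','H'] from rfl, show "SY".toList = ['S','Y'] from rfl,
    show "SH".toList = ['S','H'] from rfl,
    show "th".toList = ['t','h'] from rfl, show "ts".toList = ['t','s'] from rfl,
    show "Th".toList = ['T','h'] from rfl, show "Ts".toList = ['T','s'] from rfl,
    show "tH".toList = ['t','H'] from rfl, show "TS".toList = ['T','S'] from rfl,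
    show "TH".toList = ['T','H'] from rfl]
  simp only [pvReplace_eq_rep2]
  simp only [pvPassesP, chainP, List.foldl_cons, List.foldl_nil]

-- ===== VERDICT (by name: the statement is the Claim_ definition above) =====
theorem replace_substrings_spec : Claim_equal_replace_substrings := by
  intro s _
  unfold Spec_replace_substrings
  apply String.toList_inj.mp
  rw [pvAlt_toList, pvChain_eq_scanA s.toList.length s.toList le_rfl]
  unfold replace_substrings
  rw [String.toList_ofList, pv_main s.toList.length s.toList 0 [] (by omega)]
  simp
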